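-- pv_equiv track=rewrite | github.com/Youngmook-Lim/TIL_LeetHub | 2186-count-vowel-substrings-of-a-string/2186-count-vowel-substrings-of-a-string.py | _countValidSubstrings
-- ===== SOURCE A (Python) =====
-- def _countValidSubstrings(s: str) -> int:
--     total = 0
--     count = {}
--     left = 0
--     # Expand the sliding window
--     for right in range(len(s)):
--         count[s[right]] = count.get(s[right], 0) + 1
--
--         # When the window contains all five vowels,
--         # every extension to the right remains valid.
--         while len(count) == 5:
--             total += len(s) - right
--             count[s[left]] -= 1
--             if count[s[left]] == 0:
--                 del count[s[left]]
--             left += 1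
--
--     return total
-- ===== SOURCE B (Python) =====
-- def _countValidSubstrings(s: str) -> int:
--     n = len(s)
--     total = 0
--     for i in range(n):
--         seen = set()
--         for j in range(i, n):
--             seen.add(s[j])
--             if len(seen) == 5:
--                 total += n - j
--                 break
--     return total
-- ===== Notes on version B (the rewrite author's own statement) =====
-- stated objective: simpler
-- what changed: Replaces the sliding-window with dict bookkeeping and shrink loop by a direct per-start scan: for each start index, a fresh set collects characters until five distinct ones appear, at which point all extensions are counted and the inner loop breaks.
import Mathlib
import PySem

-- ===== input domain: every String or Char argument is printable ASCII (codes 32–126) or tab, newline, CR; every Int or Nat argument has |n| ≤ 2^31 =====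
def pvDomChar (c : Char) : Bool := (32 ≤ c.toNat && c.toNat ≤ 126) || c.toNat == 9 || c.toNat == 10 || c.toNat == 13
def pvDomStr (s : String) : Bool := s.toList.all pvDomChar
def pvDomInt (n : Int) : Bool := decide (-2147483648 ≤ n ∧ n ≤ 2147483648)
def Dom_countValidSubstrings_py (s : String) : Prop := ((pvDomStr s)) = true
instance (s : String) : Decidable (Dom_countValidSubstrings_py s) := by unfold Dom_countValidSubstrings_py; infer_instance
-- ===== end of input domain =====

-- B replaces A's sliding window (dict of multiplicities, shrink loop) by a per-start scan with a
-- fresh set that stops at the first index where five distinct characters have been seen (simpler).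

-- ===== PORT A =====
-- the 'while len(count) == 5' loop; fuel only makes the recursion total (it never runs out:
-- left increases to at most right+1, and fuel is n+1)
def pvWhileA (cs : List Char) (n right : Nat) :
    Nat → Int × PySem.Dict Char Int × Nat → Int × PySem.Dict Char Int × Nat
  | 0, st => st
  | fuel + 1, (total, d, left) =>
    if d.keys.length = 5 then
      let total' := total + ((n : Int) - (right : Int))
      let c := PySem.List.pyGetD cs (left : Int) ' '
      let d' := d.insert c (d.getD c 0 - 1)
      let d'' := if d'.getD c 0 = 0 then d'.erase c else d'
      pvWhileA cs n right fuel (total', d'', left + 1)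
    else (total, d, left)

def countValidSubstrings_py (s : String) : Int :=
  let cs := s.toList
  let n := cs.length
  ((List.range n).foldl (fun st (right : Nat) =>
      let c := PySem.List.pyGetD cs (right : Int) ' '
      let d := st.2.1.insert c (st.2.1.getD c 0 + 1)
      pvWhileA cs n right (n + 1) (st.1, d, st.2.2)) (0, PySem.Dict.empty, 0)).1

-- ===== PORT B =====
-- the inner 'for j in range(i, n)' loop of B: add s[j] to seen, stop when |seen| = 5
def pvScanB (cs : List Char) (n : Nat) (j : Nat) (seen : PySem.Set Char) : Int :=
  if h : j < n then
    let seen' := PySem.Set.add seen (PySem.List.pyGetD cs (j : Int) ' ')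
    if seen'.length = 5 then (n : Int) - (j : Int) else pvScanB cs n (j + 1) seen'
  else 0
termination_by n - j
decreasing_by omega

def countValidSubstrings_py_alt (s : String) : Int :=
  let cs := s.toList
  let n := cs.length
  (List.range n).foldl (fun total i => total + pvScanB cs n i PySem.Set.empty) 0

-- ===== PRECONDITION & SPEC =====
def Spec_countValidSubstrings_py (s : String) (out : Int) : Prop := out = countValidSubstrings_py_alt s
instance (s : String) (out : Int) : Decidable (Spec_countValidSubstrings_py s out) := by unfold Spec_countValidSubstrings_py; infer_instance

-- ===== CLAIM (what is proved, stated in full; the proofs are below) =====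
def Claim_equal_countValidSubstrings_py : Prop := ∀ (s : String), Dom_countValidSubstrings_py s → Spec_countValidSubstrings_py s (countValidSubstrings_py s)

-- ===== LEMMAS AND PROOFS =====

-- window of character indices [l, r) of cs
def pvWin (cs : List Char) (l r : Nat) : List Char := (cs.take r).drop l
-- number of distinct characters of a list
def pvK (w : List Char) : Nat := w.toFinset.card
-- the value B's inner loop contributes for start index i
def pvBval (cs : List Char) (i : Nat) : Int := pvScanB cs cs.length i PySem.Set.empty

-- ---- window structure ----
lemma pvWin_nil_of_le (cs : List Char) (l r : Nat) (h : r ≤ l) : pvWin cs l r = [] :=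
  List.drop_eq_nil_of_le (le_trans (List.length_take_le ..) h)

lemma pvWin_succ (cs : List Char) (l r : Nat) (hl : l ≤ r) (hr : r < cs.length) :
    pvWin cs l (r + 1) = pvWin cs l r ++ [cs.getD r ' '] := by
  have h1 : cs[r]? = some cs[r] := List.getElem?_eq_getElem hr
  have h2 : l ≤ (cs.take r).length := by
    simp only [List.length_take]; omega
  rw [pvWin, pvWin, List.take_add_one, h1, Option.toList_some,
    List.drop_append_of_le_length h2, List.getD_eq_getElem?_getD, h1, Option.getD_some]

lemma pvWin_cons (cs : List Char) (l r : Nat) (hl : l < r) (hr : r ≤ cs.length) :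
    pvWin cs l r = cs.getD l ' ' :: pvWin cs (l + 1) r := by
  have hlt : l < (cs.take r).length := by
    simp only [List.length_take]; omega
  have h1 : cs[l]? = some cs[l] := List.getElem?_eq_getElem (by omega)
  rw [pvWin, List.drop_eq_getElem_cons hlt, List.getElem_take,
    List.getD_eq_getElem?_getD, h1]
  rfl

-- ---- distinct-count facts ----
lemma pvK_append_singleton (w : List Char) (c : Char) :
    pvK (w ++ [c]) = if c ∈ w then pvK w else pvK w + 1 := by
  simp only [pvK, List.toFinset_append, List.toFinset_cons, List.toFinset_nil,
    insert_empty_eq, Finset.union_singleton]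
  by_cases hc : c ∈ w
  · rw [if_pos hc, Finset.insert_eq_self.2 (List.mem_toFinset.2 hc)]
  · rw [if_neg hc, Finset.card_insert_of_notMem (fun h => hc (List.mem_toFinset.1 h))]

lemma pvK_le_of_sublist {w₁ w₂ : List Char} (h : w₁.Sublist w₂) : pvK w₁ ≤ pvK w₂ :=
  Finset.card_le_card (fun x hx => List.mem_toFinset.2 (h.subset (List.mem_toFinset.1 hx)))

lemma pvK_win_mono_r (cs : List Char) (l : Nat) {r r' : Nat} (h : r ≤ r') :
    pvK (pvWin cs l r) ≤ pvK (pvWin cs l r') := by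
  have h1 : cs.take r = (cs.take r').take r := by
    rw [List.take_take, min_eq_left h]
  have : pvWin cs l r = (pvWin cs l r').take (r - l) := by
    rw [pvWin, pvWin, h1, List.drop_take]
  rw [this]
  exact pvK_le_of_sublist (List.take_sublist _ _)

lemma pvK_win_mono_l (cs : List Char) {l l' : Nat} (r : Nat) (h : l ≤ l') :
    pvK (pvWin cs l' r) ≤ pvK (pvWin cs l r) := by
  have : pvWin cs l' r = (pvWin cs l r).drop (l' - l) := by
    rw [pvWin, pvWin, List.drop_drop, Nat.add_sub_cancel' h]
  rw [this]
  exact pvK_le_of_sublist (List.drop_sublist _ _)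

lemma pvK_win_succ_le (cs : List Char) (l r : Nat) (hr : r < cs.length) :
    pvK (pvWin cs l (r + 1)) ≤ pvK (pvWin cs l r) + 1 := by
  by_cases hl : l ≤ r
  · rw [pvWin_succ cs l r hl hr, pvK_append_singleton]
    split_ifs <;> omega
  · rw [pvWin_nil_of_le cs l (r + 1) (by omega)]
    simp [pvK]

-- a duplicate-free list with the same members as w has length pvK w
lemma pvK_len_eq (u w : List Char) (hu : u.Nodup) (h : ∀ x, x ∈ u ↔ x ∈ w) :
    u.length = pvK w := by
  have h1 : u.toFinset = w.toFinset := by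
    ext x
    simp only [List.mem_toFinset]
    exact h x
  rw [← List.toFinset_card_of_nodup hu, h1, pvK]

-- ---- Set facts ----
lemma pvOfList_append (w : List Char) (c : Char) :
    PySem.Set.ofList (w ++ [c]) = PySem.Set.add (PySem.Set.ofList w) c := by
  simp [PySem.Set.ofList_eq_foldl, List.foldl_append]

lemma pvSet_len (w : List Char) : (PySem.Set.ofList w).length = pvK w :=
  pvK_len_eq _ _ (PySem.Set.nodup_ofList w) (PySem.Set.mem_ofList w)

-- ---- dict invariant: d is the multiplicity table of the window [l, r) ----
def pvDInv (cs : List Char) (l r : Nat) (d : PySem.Dict Char Int) : Prop :=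
  d.keys.Nodup ∧
  ∀ c, d.get? c = (if (pvWin cs l r).count c = 0 then none else some ((pvWin cs l r).count c : Int))

lemma pvFind?_filter_ne (items : List (Char × Int)) (k x : Char) (hx : x ≠ k) :
    ((items.filter (fun p => !(p.1 == k))).find? (fun p => p.1 == x)) =
      items.find? (fun p => p.1 == x) := by
  induction items with
  | nil => rfl
  | cons a t ih =>
    by_cases hk : a.1 = k
    · have hax : (a.1 == x) = false := beq_eq_false_iff_ne.2 (fun e => hx (e ▸ hk))
      rw [List.filter_cons, if_neg (by simp [hk]), ih,
        List.find?_cons_of_neg (by simp [hax])]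
    · rw [List.filter_cons, if_pos (by simp [hk])]
      by_cases hx2 : (a.1 == x) = true
      · rw [List.find?_cons_of_pos (by simpa using hx2),
          List.find?_cons_of_pos (by simpa using hx2)]
      · rw [List.find?_cons_of_neg (by simpa using hx2),
          List.find?_cons_of_neg (by simpa using hx2), ih]

lemma pvDict_get?_erase (d : PySem.Dict Char Int) (k x : Char) :
    (d.erase k).get? x = if x = k then none else d.get? x := by
  by_cases hx : x = k
  · subst hx
    rw [if_pos rfl]
    show Option.map _ (List.find? _ (d.items.filter _)) = none
    rw [List.find?_eq_none.2, Option.map_none]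
    intro p hp
    have := (List.mem_filter.1 hp).2
    simp only [Bool.not_eq_true', beq_eq_false_iff_ne] at this
    simp [this]
  · rw [if_neg hx]
    show Option.map _ (List.find? _ (d.items.filter _)) = Option.map _ (List.find? _ d.items)
    rw [pvFind?_filter_ne d.items k x hx]

lemma pvDict_nodup_keys_erase (d : PySem.Dict Char Int) (k : Char) (h : d.keys.Nodup) :
    (d.erase k).keys.Nodup := by
  exact h.sublist ((List.filter_sublist).map _)

lemma pvDInv_keys_len (cs : List Char) (l r : Nat) (d : PySem.Dict Char Int)
    (h : pvDInv cs l r d) : d.keys.length = pvK (pvWin cs l r) := by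
  obtain ⟨hnd, hget⟩ := h
  refine pvK_len_eq _ _ hnd (fun x => ?_)
  have h1 : x ∈ d.keys ↔ ¬ d.get? x = none := by
    rw [PySem.Dict.get?_eq_none_iff_not_mem_keys]; tauto
  rw [h1, hget x]
  by_cases h0 : (pvWin cs l r).count x = 0
  · rw [if_pos h0]
    simp [List.count_eq_zero.1 h0]
  · rw [if_neg h0]
    simp only [not_false_iff, true_iff, reduceCtorEq]
    exact List.count_pos_iff.1 (Nat.pos_of_ne_zero h0)

lemma pvDInv_getD (cs : List Char) (l r : Nat) (d : PySem.Dict Char Int)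
    (h : pvDInv cs l r d) (c : Char) : d.getD c 0 = ((pvWin cs l r).count c : Int) := by
  rw [PySem.Dict.getD_eq_get?_getD, h.2 c]
  split
  · next h0 => simp [h0]
  · rfl

-- pushing s[r] into the dict extends the window on the right
lemma pvDInv_push (cs : List Char) (l r : Nat) (d : PySem.Dict Char Int)
    (h : pvDInv cs l r d) (hl : l ≤ r) (hr : r < cs.length) :
    pvDInv cs l (r + 1) (d.insert (cs.getD r ' ') (d.getD (cs.getD r ' ') 0 + 1)) := by
  obtain ⟨hnd, hget⟩ := h
  refine ⟨PySem.Dict.nodup_keys_insert _ _ _ hnd, fun x => ?_⟩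
  have hg : d.getD (cs.getD r ' ') 0 = ((pvWin cs l r).count (cs.getD r ' ') : Int) :=
    pvDInv_getD cs l r d ⟨hnd, hget⟩ _
  rw [PySem.Dict.get?_insert, pvWin_succ cs l r hl hr]
  by_cases hx : x = cs.getD r ' '
  · subst hx
    have h2 : List.count (cs.getD r ' ') (pvWin cs l r ++ [cs.getD r ' ']) =
        List.count (cs.getD r ' ') (pvWin cs l r) + 1 := by
      rw [List.count_append, List.count_singleton, if_pos (by simp)]
    rw [if_pos rfl, hg, h2, if_neg (by omega)]
    push_cast
    rfl
  · have h2 : List.count x (pvWin cs l r ++ [cs.getD r ' ']) =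
        List.count x (pvWin cs l r) := by
      rw [List.count_append, List.count_singleton,
        if_neg (by simp only [beq_iff_eq]; exact fun e => hx e.symm), Nat.add_zero]
    rw [if_neg hx, hget x, h2]

-- the decrement / delete pair pops s[l] from the window on the left
lemma pvDInv_pop (cs : List Char) (l r : Nat) (d : PySem.Dict Char Int)
    (h : pvDInv cs l r d) (hl : l < r) (hr : r ≤ cs.length) :
    pvDInv cs (l + 1) r
      (if (d.insert (cs.getD l ' ') (d.getD (cs.getD l ' ') 0 - 1)).getD (cs.getD l ' ') 0 = 0
       then (d.insert (cs.getD l ' ') (d.getD (cs.getD l ' ') 0 - 1)).erase (cs.getD l ' ')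
       else d.insert (cs.getD l ' ') (d.getD (cs.getD l ' ') 0 - 1)) := by
  obtain ⟨hnd, hget⟩ := h
  have hw : pvWin cs l r = cs.getD l ' ' :: pvWin cs (l + 1) r := pvWin_cons cs l r hl hr
  set c := cs.getD l ' ' with hc
  set w' := pvWin cs (l + 1) r with hw'
  have hcnt : (pvWin cs l r).count c = w'.count c + 1 := by
    rw [hw, List.count_cons, if_pos (by simp)]
  have hg : d.getD c 0 = ((w'.count c + 1 : Nat) : Int) := by
    rw [pvDInv_getD cs l r d ⟨hnd, hget⟩ c, hcnt]
  have hgd' : (d.insert c (d.getD c 0 - 1)).getD c 0 = ((w'.count c : Nat) : Int) := by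
    rw [PySem.Dict.getD_eq_get?_getD, PySem.Dict.get?_insert, if_pos rfl, Option.getD_some,
      hg]
    push_cast
    ring
  have hcount_ne : ∀ x, x ≠ c → (pvWin cs l r).count x = w'.count x := fun x hx => by
    rw [hw, List.count_cons, if_neg (by simpa using fun e => hx e.symm), Nat.add_zero]
  by_cases h0 : w'.count c = 0
  · rw [if_pos (by simp [hgd', h0])]
    refine ⟨pvDict_nodup_keys_erase _ _ (PySem.Dict.nodup_keys_insert _ _ _ hnd), fun x => ?_⟩
    rw [pvDict_get?_erase]
    by_cases hx : x = c
    · rw [if_pos hx, hx, if_pos h0]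
    · rw [if_neg hx, PySem.Dict.get?_insert, if_neg hx, hget x, hcount_ne x hx]
  · rw [if_neg (by simp [hgd', h0])]
    refine ⟨PySem.Dict.nodup_keys_insert _ _ _ hnd, fun x => ?_⟩
    rw [PySem.Dict.get?_insert]
    by_cases hx : x = c
    · rw [if_pos hx, hx, if_neg h0, hg]
      push_cast
      norm_num
      rw [hw']
    · rw [if_neg hx, hget x, hcount_ne x hx]

-- ---- running B's inner scan from the middle ----
lemma pvScanB_zero (cs : List Char) (l j : Nat) (hlj : l ≤ j) (hj : j ≤ cs.length)
    (h4 : pvK (pvWin cs l cs.length) ≤ 4) :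
    pvScanB cs cs.length j (PySem.Set.ofList (pvWin cs l j)) = 0 := by
  revert hlj hj
  induction hm : cs.length - j using Nat.strong_induction_on generalizing j with
  | _ m ih =>
  intro hlj hj
  by_cases hjn : j < cs.length
  · rw [pvScanB, dif_pos hjn]
    have hseen : PySem.Set.add (PySem.Set.ofList (pvWin cs l j))
        (PySem.List.pyGetD cs (j : Int) ' ') = PySem.Set.ofList (pvWin cs l (j + 1)) := by
      rw [PySem.List.pyGetD_natCast, pvWin_succ cs l j hlj hjn, pvOfList_append]
    have hmono : pvK (pvWin cs l (j + 1)) ≤ pvK (pvWin cs l cs.length) :=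
      pvK_win_mono_r cs l (by omega)
    rw [hseen]
    dsimp only
    rw [pvSet_len, if_neg (by omega)]
    exact ih (cs.length - (j + 1)) (by omega) (j + 1) rfl (by omega) (by omega)
  · rw [pvScanB, dif_neg hjn]

lemma pvScanB_hit (cs : List Char) (l r j : Nat) (hlj : l ≤ j) (hjr : j ≤ r)
    (hr : r < cs.length) (h4 : pvK (pvWin cs l r) ≤ 4) (h5 : pvK (pvWin cs l (r + 1)) = 5) :
    pvScanB cs cs.length j (PySem.Set.ofList (pvWin cs l j)) = (cs.length : Int) - (r : Int) := by
  revert hlj hjr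
  induction hm : r - j using Nat.strong_induction_on generalizing j with
  | _ m ih =>
  intro hlj hjr
  have hjn : j < cs.length := by omega
  rw [pvScanB, dif_pos hjn]
  have hseen : PySem.Set.add (PySem.Set.ofList (pvWin cs l j))
      (PySem.List.pyGetD cs (j : Int) ' ') = PySem.Set.ofList (pvWin cs l (j + 1)) := by
    rw [PySem.List.pyGetD_natCast, pvWin_succ cs l j hlj hjn, pvOfList_append]
  rw [hseen]
  dsimp only
  rw [pvSet_len]
  by_cases hjr' : j = r
  · subst hjr'
    rw [if_pos h5]
  · have hmono : pvK (pvWin cs l (j + 1)) ≤ pvK (pvWin cs l r) :=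
      pvK_win_mono_r cs l (by omega)
    rw [if_neg (by omega)]
    exact ih (r - (j + 1)) (by omega) (j + 1) rfl (by omega) (by omega)

lemma pvBval_eq (cs : List Char) (i : Nat) :
    pvBval cs i = pvScanB cs cs.length i (PySem.Set.ofList (pvWin cs i i)) := by
  rw [pvWin_nil_of_le cs i i le_rfl]
  rfl

-- ---- A's while loop ----
lemma pvWhileA_spec (cs : List Char) (r : Nat) (hr : r < cs.length) :
    ∀ fuel l total d, r + 1 - l < fuel → l ≤ r + 1 →
    pvDInv cs l (r + 1) d → pvK (pvWin cs l r) ≤ 4 →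
    total = ∑ i ∈ Finset.range l, pvBval cs i →
    ∃ l' d', pvWhileA cs cs.length r fuel (total, d, l) =
        (∑ i ∈ Finset.range l', pvBval cs i, d', l') ∧
      l' ≤ r + 1 ∧ pvDInv cs l' (r + 1) d' ∧ pvK (pvWin cs l' (r + 1)) ≤ 4 := by
  intro fuel
  induction fuel with
  | zero => intro l total d hfuel; exact absurd hfuel (by omega)
  | succ fuel ih =>
    intro l total d hfuel hlr1 hinv h4 htot
    by_cases hc : d.keys.length = 5
    · have h5 : pvK (pvWin cs l (r + 1)) = 5 := by
        rw [← pvDInv_keys_len cs l (r + 1) d hinv]; exact hc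
      have hlr : l ≤ r := by
        by_contra hcon
        rw [pvWin_nil_of_le cs l (r + 1) (by omega)] at h5
        simp [pvK] at h5
      have hb : pvBval cs l = (cs.length : Int) - (r : Int) := by
        rw [pvBval_eq]
        exact pvScanB_hit cs l r l le_rfl hlr hr h4 h5
      have hpop := pvDInv_pop cs l (r + 1) d hinv (by omega) (by omega)
      rw [pvWhileA, if_pos hc]
      simp only [PySem.List.pyGetD_natCast]
      obtain ⟨l', d', heq, h1, h2, h3⟩ :=
        ih (l + 1) (total + ((cs.length : Int) - (r : Int)))
          (if (d.insert (cs.getD l ' ') (d.getD (cs.getD l ' ') 0 - 1)).getD (cs.getD l ' ') 0 = 0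
           then (d.insert (cs.getD l ' ') (d.getD (cs.getD l ' ') 0 - 1)).erase (cs.getD l ' ')
           else d.insert (cs.getD l ' ') (d.getD (cs.getD l ' ') 0 - 1))
          (by omega) (by omega) hpop
          (le_trans (pvK_win_mono_l cs r (Nat.le_succ l)) h4)
          (by rw [Finset.sum_range_succ, ← htot, hb])
      exact ⟨l', d', heq, h1, h2, h3⟩
    · rw [pvWhileA, if_neg hc]
      have hne : pvK (pvWin cs l (r + 1)) ≠ 5 := by
        rw [← pvDInv_keys_len cs l (r + 1) d hinv]; exact hc
      have hle : pvK (pvWin cs l (r + 1)) ≤ pvK (pvWin cs l r) + 1 := pvK_win_succ_le cs l r hr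
      exact ⟨l, d, by rw [htot], hlr1, hinv, by omega⟩

-- ---- A's main loop ----
def pvStateA (cs : List Char) (r : Nat) : Int × PySem.Dict Char Int × Nat :=
  (List.range r).foldl (fun st (right : Nat) =>
      let c := PySem.List.pyGetD cs (right : Int) ' '
      let d := st.2.1.insert c (st.2.1.getD c 0 + 1)
      pvWhileA cs cs.length right (cs.length + 1) (st.1, d, st.2.2)) (0, PySem.Dict.empty, 0)

lemma pvStateA_succ (cs : List Char) (r : Nat) :
    pvStateA cs (r + 1) =
      (let st := pvStateA cs r
       let c := PySem.List.pyGetD cs (r : Int) ' '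
       let d := st.2.1.insert c (st.2.1.getD c 0 + 1)
       pvWhileA cs cs.length r (cs.length + 1) (st.1, d, st.2.2)) := by
  simp [pvStateA, List.range_succ]

lemma pvStateA_inv (cs : List Char) : ∀ r, r ≤ cs.length →
    ∃ l d, pvStateA cs r = (∑ i ∈ Finset.range l, pvBval cs i, d, l) ∧
      l ≤ r ∧ pvDInv cs l r d ∧ pvK (pvWin cs l r) ≤ 4 := by
  intro r
  induction r with
  | zero =>
    intro _
    refine ⟨0, PySem.Dict.empty, ?_, le_rfl, ⟨PySem.Dict.nodup_keys_empty, fun c => ?_⟩, ?_⟩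
    · simp [pvStateA]
    · rw [PySem.Dict.get?_empty, pvWin_nil_of_le cs 0 0 le_rfl]
      simp
    · rw [pvWin_nil_of_le cs 0 0 le_rfl]
      simp [pvK]
  | succ r ih =>
    intro hr1
    obtain ⟨l, d, hst, hlr, hinv, h4⟩ := ih (by omega)
    have hr : r < cs.length := by omega
    have hpush := pvDInv_push cs l r d hinv hlr hr
    obtain ⟨l', d', heq, h1, h2, h3⟩ :=
      pvWhileA_spec cs r hr (cs.length + 1) l (∑ i ∈ Finset.range l, pvBval cs i)
        (d.insert (cs.getD r ' ') (d.getD (cs.getD r ' ') 0 + 1))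
        (by omega) (by omega) hpush h4 rfl
    refine ⟨l', d', ?_, by omega, h2, h3⟩
    rw [pvStateA_succ, hst]
    simp only [PySem.List.pyGetD_natCast]
    exact heq

lemma pvPortA_eq (s : String) :
    countValidSubstrings_py s = (pvStateA s.toList s.toList.length).1 := rfl

lemma pvPortB_eq (s : String) :
    countValidSubstrings_py_alt s = ∑ i ∈ Finset.range s.toList.length, pvBval s.toList i := by
  show (List.range s.toList.length).foldl
      (fun total i => total + pvScanB s.toList s.toList.length i PySem.Set.empty) 0 = _
  rw [PySem.List.foldl_add (g := fun i => pvScanB s.toList s.toList.length i PySem.Set.empty),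
    zero_add]
  rfl

-- ===== VERDICT (by name: the statement is the Claim_ definition above) =====
theorem countValidSubstrings_py_spec : Claim_equal_countValidSubstrings_py := by
  intro s _hdom
  unfold Spec_countValidSubstrings_py
  obtain ⟨l, d, hst, hl, hinv, h4⟩ := pvStateA_inv s.toList s.toList.length le_rfl
  rw [pvPortA_eq, pvPortB_eq, hst]
  show (∑ i ∈ Finset.range l, pvBval s.toList i) =
    ∑ i ∈ Finset.range s.toList.length, pvBval s.toList i
  apply Finset.sum_subset
  · intro x hx
    simp only [Finset.mem_range] at *
    omega
  intro i hin hnotl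
  have hli : l ≤ i := by simp only [Finset.mem_range] at hnotl; omega
  have hi : i < s.toList.length := Finset.mem_range.1 hin
  rw [pvBval_eq]
  exact pvScanB_zero s.toList i i le_rfl (by omega)
    (le_trans (pvK_win_mono_l s.toList s.toList.length hli) h4)
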